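-- pv_equiv track=rewrite | github.com/nemesida-waf/waf-bypass | bypass.py | zone_combining
-- ===== SOURCE A (Python) =====
-- def zone_combining(data):
--
--     # init
--     res = {}
--
--     # skip empty list
--     if not len(data):
--         return res
--
--     # list processing
--     for item in data:
--         k = item.split(':', 1)[0]
--         v = item.split(':', 1)[1]
--         if k not in res:
--             res[k] = []
--         res[k].append(v)
--
--     # dictionary processing
--     for k, v in res.items():
--         res[k] = '|'.join(v)
--
--     # return result
--     return res
-- ===== SOURCE B (Python) =====
-- def zone_combining(data):
--     res = {}
--     for item in data:
--         parts = item.split(':', 1)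
--         k = parts[0]
--         v = parts[1]
--         if k in res:
--             res[k] = res[k] + '|' + v
--         else:
--             res[k] = v
--     return res
-- ===== Notes on version B (the rewrite author's own statement) =====
-- stated objective: simpler
-- what changed: single pass that accumulates the joined string per key directly in the dict, dropping A's intermediate list-of-values representation and its second join pass over the dict
import Mathlib
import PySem

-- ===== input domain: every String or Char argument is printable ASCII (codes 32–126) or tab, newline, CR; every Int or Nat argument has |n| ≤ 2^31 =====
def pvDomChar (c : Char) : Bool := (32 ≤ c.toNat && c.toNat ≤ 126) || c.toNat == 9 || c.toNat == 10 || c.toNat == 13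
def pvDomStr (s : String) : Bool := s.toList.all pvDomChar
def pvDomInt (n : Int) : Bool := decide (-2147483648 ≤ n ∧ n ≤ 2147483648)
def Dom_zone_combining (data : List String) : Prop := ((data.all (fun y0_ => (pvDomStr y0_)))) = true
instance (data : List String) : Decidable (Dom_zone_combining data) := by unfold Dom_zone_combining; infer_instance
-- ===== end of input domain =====

-- B replaces A's two-pass group-then-join (dict of value lists, second pass joining each list)
-- by one pass that keeps the already-joined string per key in the dict: simpler, one structure less.


-- ===== PORT A =====
-- for k,v in res.items(): res[k] = '|'.join(v) overwrites each value in place while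
-- iterating, leaving keys and their order untouched: ported as a map over the items.
-- item.split(':', 1)[1] raises IndexError when item has no ':' (pyGet? = none there);
-- those inputs are outside Pre_; the .getD "" branch is never reached inside Pre_.
def zone_combining (data : List String) : List (String × String) :=
  if data.length = 0 then []
  else
    (data.foldl (fun res item =>
        let k := (PySem.List.pyGet? ((PySem.Str.splitMax? item ":" 1).getD []) 0).getD ""
        let v := (PySem.List.pyGet? ((PySem.Str.splitMax? item ":" 1).getD []) 1).getD ""
        let res1 := if res.contains k then res else res.insert k ([] : List String)
        res1.modify k [] (fun l => l ++ [v]))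
      PySem.Dict.empty).items.map (fun p => (p.1, PySem.Str.join "|" p.2))

-- ===== PORT B =====
-- res[k] + '|' + v is ported as '|'-join of the two strings (exact: a + '|' + b = '|'.join([a, b]))
def zone_combining_alt (data : List String) : List (String × String) :=
  (data.foldl (fun res item =>
      let parts := (PySem.Str.splitMax? item ":" 1).getD []
      let k := (PySem.List.pyGet? parts 0).getD ""
      let v := (PySem.List.pyGet? parts 1).getD ""   -- parts[1]: IndexError (none) iff no ':', outside Pre_
      if res.contains k then res.insert k (PySem.Str.join "|" [res.getD k "", v])
      else res.insert k v)
    PySem.Dict.empty).items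

-- ===== PRECONDITION & SPEC =====
-- Pre_ excludes exactly the inputs containing an item without ':' , on which Python A
-- (and B alike) raises IndexError from item.split(':', 1)[1].
def Pre_zone_combining (data : List String) : Prop :=
  (data.all (fun s => PySem.Str.isIn ":" s)) = true
instance (data : List String) : Decidable (Pre_zone_combining data) := by
  unfold Pre_zone_combining; infer_instance
def pvWitness_zone_combining : List String := ["a:1", "b:2", "a:3"]
def Spec_zone_combining (data : List String) (out : List (String × String)) : Prop :=
  out = zone_combining_alt data
instance (data : List String) (out : List (String × String)) : Decidable (Spec_zone_combining data out) := by
  unfold Spec_zone_combining; infer_instance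

-- ===== CLAIM (what is proved, stated in full; the proofs are below) =====
def Claim_equal_zone_combining : Prop :=
  ∀ (data : List String), Dom_zone_combining data → Pre_zone_combining data →
    Spec_zone_combining data (zone_combining data)

-- ===== LEMMAS AND PROOFS =====

-- value map applied by A's second pass
def zcJoin (p : String × List String) : String × String := (p.1, PySem.Str.join "|" p.2)

theorem cjoin_snoc (s x : List Char) (l : List (List Char)) (h : l ≠ []) :
    PySem.Chars.join s (l ++ [x]) = PySem.Chars.join s l ++ s ++ x := by
  induction l with
  | nil => exact absurd rfl h
  | cons a t ih =>
    cases t with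
    | nil => simp [PySem.Chars.join_cons_cons, PySem.Chars.join_singleton]
    | cons b t' =>
      have h2 := ih (by simp)
      simp only [List.cons_append] at h2 ⊢
      rw [PySem.Chars.join_cons_cons, PySem.Chars.join_cons_cons, h2]
      simp [List.append_assoc]

theorem str_toList_inj {a b : String} (h : a.toList = b.toList) : a = b :=
  String.toList_injective h

theorem sjoin_singleton (v : String) : PySem.Str.join "|" [v] = v := by
  apply str_toList_inj
  simp [PySem.Str.toList_join, PySem.Chars.join_singleton]

theorem sjoin_snoc (vs : List String) (v : String) (h : vs ≠ []) :
    PySem.Str.join "|" (vs ++ [v]) = PySem.Str.join "|" [PySem.Str.join "|" vs, v] := by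
  apply str_toList_inj
  simp only [PySem.Str.toList_join, List.map_append, List.map_cons, List.map_nil]
  rw [cjoin_snoc _ _ _ (by simpa using h), PySem.Chars.join_cons_cons,
    PySem.Chars.join_singleton]

theorem zc_loop (data : List String) (d : PySem.Dict String (List String))
    (r : PySem.Dict String String)
    (hnd : d.keys.Nodup)
    (hne : ∀ p ∈ d.items, p.2 ≠ ([] : List String))
    (hinv : r.items = d.items.map zcJoin) :
    (data.foldl (fun res item =>
        let parts := (PySem.Str.splitMax? item ":" 1).getD []
        let k := (PySem.List.pyGet? parts 0).getD ""
        let v := (PySem.List.pyGet? parts 1).getD ""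
        if res.contains k then res.insert k (PySem.Str.join "|" [res.getD k "", v])
        else res.insert k v) r).items
    = (data.foldl (fun res item =>
        let k := (PySem.List.pyGet? ((PySem.Str.splitMax? item ":" 1).getD []) 0).getD ""
        let v := (PySem.List.pyGet? ((PySem.Str.splitMax? item ":" 1).getD []) 1).getD ""
        let res1 := if res.contains k then res else res.insert k ([] : List String)
        res1.modify k [] (fun l => l ++ [v])) d).items.map zcJoin := by
  induction data generalizing d r with
  | nil => simpa using hinv
  | cons item rest ih =>
    simp only [List.foldl_cons]
    set k := (PySem.List.pyGet? ((PySem.Str.splitMax? item ":" 1).getD []) 0).getD "" with hk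
    set v := (PySem.List.pyGet? ((PySem.Str.splitMax? item ":" 1).getD []) 1).getD "" with hv
    have hkeys : r.keys = d.keys := by
      show r.items.map Prod.fst = d.items.map Prod.fst
      rw [hinv, List.map_map]; rfl
    have hcont : r.contains k = d.contains k := by
      rw [PySem.Dict.contains_eq_decide_mem_keys, PySem.Dict.contains_eq_decide_mem_keys, hkeys]
    have hndr : r.keys.Nodup := by rw [hkeys]; exact hnd
    by_cases hc : d.contains k = true
    · -- key already present
      have hrc : r.contains k = true := by rw [hcont]; exact hc
      obtain ⟨p, hp, hpk⟩ : ∃ p ∈ d.items, p.1 = k := by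
        have : k ∈ d.keys := (PySem.Dict.contains_iff_mem_keys d k).mp hc
        simpa [PySem.Dict.keys, List.mem_map] using this
      obtain ⟨vs, hvs⟩ : ∃ vs, (k, vs) ∈ d.items := ⟨p.2, by cases p; simpa [← hpk] using hp⟩
      have hvsne : vs ≠ [] := hne _ hvs
      have hgetd : d.getD k [] = vs := PySem.Dict.getD_of_mem_items d hvs hnd []
      have hrget : r.getD k "" = PySem.Str.join "|" vs := by
        have hmem : (k, PySem.Str.join "|" vs) ∈ r.items := by
          rw [hinv]; exact List.mem_map.mpr ⟨(k, vs), hvs, rfl⟩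
        exact PySem.Dict.getD_of_mem_items r hmem hndr ""
      have hA : (if d.contains k = true then d else d.insert k ([] : List String)).modify k []
          (fun l => l ++ [v]) = d.insert k (vs ++ [v]) := by
        rw [if_pos hc]; simp only [PySem.Dict.modify, hgetd]
      have hB : (if r.contains k = true then
            r.insert k (PySem.Str.join "|" [r.getD k "", v]) else r.insert k v)
          = r.insert k (PySem.Str.join "|" [PySem.Str.join "|" vs, v]) := by
        rw [if_pos hrc, hrget]
      rw [hA, hB]
      refine ih _ _ (PySem.Dict.nodup_keys_insert _ _ _ hnd) ?_ ?_
      · intro q hq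
        rcases (PySem.Dict.mem_items_insert _ _ _ _).mp hq with h1 | h2
        · subst h1; simp [hvsne]
        · exact hne _ h2.1
      · rw [PySem.Dict.items_insert_of_contains _ _ hrc,
          PySem.Dict.items_insert_of_contains _ _ hc, hinv, List.map_map, List.map_map]
        refine List.map_congr_left (fun q hq => ?_)
        by_cases hqk : q.1 = k
        · have hq2 : q.2 = vs := by
            have : d.getD q.1 [] = q.2 := by
              cases q; exact PySem.Dict.getD_of_mem_items d hq hnd []
            rw [hqk, hgetd] at this; exact this.symm
          simp [Function.comp, zcJoin, hqk, hq2, sjoin_snoc vs v hvsne]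
        · simp [Function.comp, zcJoin, hqk]
    · -- fresh key
      have hc' : d.contains k = false := by simpa using hc
      have hrc : r.contains k = false := by rw [hcont]; exact hc'
      have hA : (if d.contains k = true then d else d.insert k ([] : List String)).modify k []
          (fun l => l ++ [v]) = d.insert k [v] := by
        rw [if_neg (by simp [hc'])]
        simp only [PySem.Dict.modify, PySem.Dict.getD_insert_self,
          PySem.Dict.insert_insert_self, List.nil_append]
      have hB : (if r.contains k = true then
            r.insert k (PySem.Str.join "|" [r.getD k "", v]) else r.insert k v)
          = r.insert k v := by
        rw [if_neg (by simp [hrc])]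
      rw [hA, hB]
      refine ih _ _ (PySem.Dict.nodup_keys_insert _ _ _ hnd) ?_ ?_
      · intro q hq
        rcases (PySem.Dict.mem_items_insert _ _ _ _).mp hq with h1 | h2
        · subst h1; simp
        · exact hne _ h2.1
      · rw [PySem.Dict.items_insert_of_not_contains _ _ hrc,
          PySem.Dict.items_insert_of_not_contains _ _ hc', hinv, List.map_append]
        simp [zcJoin, sjoin_singleton]

-- ===== VERDICT (by name: the statement is the Claim_ definition above) =====
theorem zone_combining_spec : Claim_equal_zone_combining := by
  intro data _hdom _hpre
  unfold Spec_zone_combining zone_combining zone_combining_alt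
  cases data with
  | nil => rfl
  | cons a t =>
    rw [if_neg (by simp)]
    exact (zc_loop (a :: t) PySem.Dict.empty PySem.Dict.empty
      PySem.Dict.nodup_keys_empty (by simp [PySem.Dict.empty]) (by rfl)).symm
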